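-- pv_equiv track=rewrite | github.com/chogamy/NARKMA_HCLT2022 | inference.py | No_BI_first
-- ===== SOURCE A (Python) =====
-- def No_BI_first(morph, tag):
--     result = []
--     tag = tag.split(" ")
--
--     cur_tag = tag[0]
--
--     morph = list(morph)
--     morph.append("<end>")
--     tag.append("<end>")
--     for i in range(len(morph)-1):
--         result.append(morph[i])
--
--         # syl+    or syl" "
--         if (morph[i] != "+" and morph[i] != " ") and (morph[i+1] == "+" or morph[i+1] == " "):
--             result.append(cur_tag)
--             cur_tag = ""
--         # " "syl or +syl
--         elif (morph[i] == " " or morph[i] == "+") and (morph[i+1] != "+" and morph[i+1] != " "):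
--             cur_tag = tag[i+1]
--         # ++ or (+ ) or ( +) or (  )
--         elif (morph[i] == "+" or morph[i] == " ") and (morph[i+1] == "+" or morph[i+1] == " "):
--             result.pop()
--         # syl, syl?
--
--     if cur_tag != "<end>" and result[-1] != "/O" and result[-1] != "/O+":
--         result.append(cur_tag)
--
--     return "".join(result)
-- ===== SOURCE B (Python) =====
-- def No_BI_first(morph, tag):
--     tags = tag.split(" ")
--     tags.append("<end>")
--     cur_tag = tags[0]
--     n = len(morph)
--     out = []
--     i = 0
--     while i < n:
--         j = i + 1
--         if morph[i] in "+ ":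
--             while j < n and morph[j] in "+ ":
--                 j += 1
--             out.append(morph[j - 1])
--             cur_tag = tags[j]
--         else:
--             while j < n and morph[j] not in "+ ":
--                 j += 1
--             out.append(morph[i:j])
--             if j < n:
--                 out.append(cur_tag)
--                 cur_tag = ""
--         i = j
--     if cur_tag != "<end>":
--         out.append(cur_tag)
--     return "".join(out)
-- ===== Notes on version B (the rewrite author's own statement) =====
-- stated objective: simpler
-- what changed: B scans morph run-by-run (maximal delimiter/syllable runs found by inner while-scans) instead of A's char-by-char look-ahead with append/pop, and drops A's dead result[-1] guard (the last result entry is always a single character, never '/O' or '/O+').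
import Mathlib
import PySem

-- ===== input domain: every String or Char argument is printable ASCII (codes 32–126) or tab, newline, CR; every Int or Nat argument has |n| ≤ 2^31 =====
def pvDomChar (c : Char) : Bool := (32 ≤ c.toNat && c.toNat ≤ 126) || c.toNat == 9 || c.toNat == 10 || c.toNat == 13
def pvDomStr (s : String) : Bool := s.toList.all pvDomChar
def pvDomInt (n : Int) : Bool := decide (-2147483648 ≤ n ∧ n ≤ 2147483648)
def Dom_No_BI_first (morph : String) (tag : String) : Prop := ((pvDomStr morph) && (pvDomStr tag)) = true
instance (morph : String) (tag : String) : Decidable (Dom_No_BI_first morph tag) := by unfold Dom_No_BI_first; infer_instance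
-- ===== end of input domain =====

-- B replaces A's char-by-char look-ahead scan (append/pop of single chars) by a run-at-a-time
-- scan over maximal delimiter/syllable runs, dropping A's dead result[-1] guard; objective: simpler.

-- ===== PORT A =====
-- the "<end>" sentinel as a list of code points
def pvEnd : List Char := ['<', 'e', 'n', 'd', '>']

-- literal port of A's `for i in range(len(morph)-1)` loop over the char list with its
-- look-ahead `morph[i+1]` (the appended "<end>" sentinel when rest is empty); state =
-- (result, cur_tag); `none` = the IndexError of `tag[i+1]`
def aLoop (tags2 : List (List Char)) (i : Nat) (m : List Char)
    (result : List (List Char)) (cur : List Char) :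
    Option (List (List Char) × List Char) :=
  match m with
  | [] => some (result, cur)
  | c :: rest =>
    let nxt : List Char := match rest with
      | [] => pvEnd
      | d :: _ => [d]
    let result1 := result ++ [[c]]
    if ([c] ≠ ['+'] ∧ [c] ≠ [' ']) ∧ (nxt = ['+'] ∨ nxt = [' ']) then
      aLoop tags2 (i+1) rest (result1 ++ [cur]) []
    else if ([c] = [' '] ∨ [c] = ['+']) ∧ (nxt ≠ ['+'] ∧ nxt ≠ [' ']) then
      match PySem.List.pyGet? tags2 ((i : Int) + 1) with
      | none => none
      | some t => aLoop tags2 (i+1) rest result1 t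
    else if ([c] = ['+'] ∨ [c] = [' ']) ∧ (nxt = ['+'] ∨ nxt = [' ']) then
      aLoop tags2 (i+1) rest result1.dropLast cur
    else
      aLoop tags2 (i+1) rest result1 cur

def No_BI_first (morph : String) (tag : String) : String :=
  let tags := PySem.Chars.splitOn tag.toList [' ']
  let cur0 := tags.headD []
  let tags2 := tags ++ [pvEnd]
  match aLoop tags2 0 morph.toList [] cur0 with
  | none => ""   -- IndexError of tag[i+1]: excluded by Pre_
  | some (result, cur) =>
    if cur ≠ pvEnd then
      match PySem.List.pyGet? result (-1 : Int) with
      | none => ""   -- IndexError of result[-1]: excluded by Pre_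
      | some last =>
        if last ≠ ['/', 'O'] ∧ last ≠ ['/', 'O', '+'] then
          String.ofList (result ++ [cur]).flatten
        else String.ofList result.flatten
    else String.ofList result.flatten

-- ===== PORT B =====
def pvIsDelim (c : Char) : Bool := c == '+' || c == ' '

-- port of B's while-loop, one step per maximal run (the inner `while j < n and …` scans are
-- takeWhile); `fuel` is a structural counter for the while loop, always ≥ m.length at a call
def bLoop (tags2 : List (List Char)) (fuel : Nat) (j : Nat) (m : List Char)
    (out : List (List Char)) (cur : List Char) :
    Option (List (List Char) × List Char) :=
  match m with
  | [] => some (out, cur)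
  | c :: rest =>
    match fuel with
    | 0 => some (out, cur)   -- unreachable: fuel ≥ m.length at every call
    | fuel' + 1 =>
      if pvIsDelim c then
        let run := (c :: rest).takeWhile pvIsDelim
        match PySem.List.pyGet? tags2 ((j : Int) + run.length) with
        | none => none
        | some t => bLoop tags2 fuel' (j + run.length) ((c :: rest).drop run.length)
            (out ++ [[run.getLastD c]]) t
      else
        let run := (c :: rest).takeWhile (fun x => ! pvIsDelim x)
        if (c :: rest).drop run.length = [] then some (out ++ [run], cur)
        else bLoop tags2 fuel' (j + run.length) ((c :: rest).drop run.length)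
            (out ++ [run, cur]) []

def No_BI_first_alt (morph : String) (tag : String) : String :=
  let tags := PySem.Chars.splitOn tag.toList [' ']
  let tags2 := tags ++ [pvEnd]
  match bLoop tags2 morph.toList.length 0 morph.toList [] (tags.headD []) with
  | none => ""   -- IndexError of tags[j]: excluded by Pre_
  | some (out, cur) =>
    if cur ≠ pvEnd then String.ofList (out ++ [cur]).flatten
    else String.ofList out.flatten

-- ===== PRECONDITION & SPEC =====
-- Pre_ excludes exactly the inputs where A raises IndexError: an empty morph whose first split
-- tag is not "<end>" (result[-1] on an empty result), and a delimiter→syllable boundary at char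
-- index i with i+1 beyond the extended split-tag list (tag[i+1]).
def Pre_No_BI_first (morph : String) (tag : String) : Prop :=
  (morph.toList = [] → (PySem.Chars.splitOn tag.toList [' ']).headD [] = pvEnd) ∧
  (∀ i, i < morph.toList.length →
    (pvIsDelim (morph.toList.getD i 'a') = true ∧
      (i + 1 = morph.toList.length ∨ pvIsDelim (morph.toList.getD (i+1) 'a') = false)) →
    i + 1 < (PySem.Chars.splitOn tag.toList [' ']).length + 1)
instance (morph : String) (tag : String) : Decidable (Pre_No_BI_first morph tag) := by
  unfold Pre_No_BI_first; infer_instance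

def pvWitness_No_BI_first : String × String := ("a+b", "X Y Z")

def Spec_No_BI_first (morph : String) (tag : String) (out : String) : Prop :=
  out = No_BI_first_alt morph tag
instance (morph : String) (tag : String) (out : String) : Decidable (Spec_No_BI_first morph tag out) := by unfold Spec_No_BI_first; infer_instance

-- ===== CLAIM (what is proved, stated in full; the proofs are below) =====
def Claim_equal_No_BI_first : Prop := ∀ (morph : String) (tag : String), Dom_No_BI_first morph tag → Pre_No_BI_first morph tag → Spec_No_BI_first morph tag (No_BI_first morph tag)

-- ===== LEMMAS AND PROOFS =====

theorem pv_drop_takeWhile (p : Char → Bool) (l : List Char) :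
    l.drop (l.takeWhile p).length = l.dropWhile p := by
  induction l with
  | nil => rfl
  | cons c rest ih =>
    by_cases h : p c = true
    · simp [h, ih]
    · simp only [Bool.not_eq_true] at h
      simp [h]

theorem pv_takeWhile_append_drop (p : Char → Bool) (l : List Char) :
    l.takeWhile p ++ l.drop (l.takeWhile p).length = l := by
  rw [pv_drop_takeWhile]; exact List.takeWhile_append_dropWhile

theorem pv_flatten_map_singleton (run : List Char) :
    (run.map (fun c => [c])).flatten = run := by
  induction run with
  | nil => rfl
  | cons c r ih => simp [ih]

-- A's loop over a maximal delimiter run: all pops cancel, the last delimiter survives and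
-- cur_tag is read from tags2 at the index past the run.
theorem aLoop_delim_run (tags2 : List (List Char)) (run rest' : List Char) (i : Nat)
    (outa : List (List Char)) (cur : List Char) (dflt : Char)
    (h1 : run ≠ []) (h2 : ∀ c ∈ run, pvIsDelim c = true)
    (h3 : ∀ d, rest'.head? = some d → pvIsDelim d = false) :
    aLoop tags2 i (run ++ rest') outa cur =
      match PySem.List.pyGet? tags2 ((i : Int) + run.length) with
      | none => none
      | some t => aLoop tags2 (i + run.length) rest' (outa ++ [[run.getLastD dflt]]) t := by
  induction run generalizing i outa with
  | nil => exact absurd rfl h1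
  | cons c r ih =>
    have hc : pvIsDelim c = true := h2 c (by simp)
    have hc' : c = '+' ∨ c = ' ' := by simpa [pvIsDelim] using hc
    cases r with
    | nil =>
      cases rest' with
      | nil =>
        rcases hc' with h | h <;>
          simp [aLoop, h, pvEnd]
      | cons d rest'' =>
        have hd : pvIsDelim d = false := h3 d rfl
        have hd' : ¬ (d = '+' ∨ d = ' ') := by simpa [pvIsDelim] using hd
        push_neg at hd'
        rcases hc' with h | h <;>
          simp [aLoop, h, hd'.1, hd'.2]
    | cons c2 r' =>
      have hc2 : pvIsDelim c2 = true := h2 c2 (by simp)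
      have hc2' : c2 = '+' ∨ c2 = ' ' := by simpa [pvIsDelim] using hc2
      have step : aLoop tags2 i (c :: c2 :: r' ++ rest') outa cur =
          aLoop tags2 (i+1) (c2 :: r' ++ rest') outa cur := by
        rcases hc' with h | h <;> rcases hc2' with h2c | h2c <;>
          simp [aLoop, h, h2c]
      rw [step, ih _ _ (by simp) (fun x hx => h2 x (List.mem_cons_of_mem _ hx))]
      simp only [List.length_cons]
      have e1 : ((i + 1 : Nat) : Int) + ((r'.length + 1 : Nat) : Int)
          = (i : Int) + ((r'.length + 1 + 1 : Nat) : Int) := by push_cast; ring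
      rw [e1]
      have e2 : i + 1 + (r'.length + 1) = i + (r'.length + 1 + 1) := by omega
      rw [e2]
      have e3 : (c :: c2 :: r').getLastD dflt = (c2 :: r').getLastD dflt := rfl
      rw [e3]

-- A's loop over a maximal syllable run reaching the end of morph (look-ahead "<end>")
theorem aLoop_syl_run_end (tags2 : List (List Char)) (run : List Char) (i : Nat)
    (outa : List (List Char)) (cur : List Char)
    (h2 : ∀ c ∈ run, pvIsDelim c = false) :
    aLoop tags2 i run outa cur = some (outa ++ run.map (fun c => [c]), cur) := by
  induction run generalizing i outa with
  | nil => simp [aLoop]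
  | cons c r ih =>
    have hc : pvIsDelim c = false := h2 c (by simp)
    have hc' : ¬ (c = '+' ∨ c = ' ') := by simpa [pvIsDelim] using hc
    push_neg at hc'
    cases r with
    | nil => simp [aLoop, hc'.1, hc'.2, pvEnd]
    | cons c2 r' =>
      have hc2 : pvIsDelim c2 = false := h2 c2 (by simp)
      have hc2' : ¬ (c2 = '+' ∨ c2 = ' ') := by simpa [pvIsDelim] using hc2
      push_neg at hc2'
      have step : aLoop tags2 i (c :: c2 :: r') outa cur =
          aLoop tags2 (i+1) (c2 :: r') (outa ++ [[c]]) cur := by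
        simp [aLoop, hc'.1, hc'.2, hc2'.1, hc2'.2]
      rw [step, ih _ _ (fun x hx => h2 x (List.mem_cons_of_mem _ hx))]
      simp

-- A's loop over a maximal syllable run followed by a delimiter: cur_tag is emitted and reset
theorem aLoop_syl_run_mid (tags2 : List (List Char)) (run rest' : List Char) (d : Char)
    (i : Nat) (outa : List (List Char)) (cur : List Char)
    (h1 : run ≠ []) (h2 : ∀ c ∈ run, pvIsDelim c = false)
    (h3 : rest'.head? = some d) (h4 : pvIsDelim d = true) :
    aLoop tags2 i (run ++ rest') outa cur =
      aLoop tags2 (i + run.length) rest' (outa ++ run.map (fun c => [c]) ++ [cur]) [] := by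
  induction run generalizing i outa with
  | nil => exact absurd rfl h1
  | cons c r ih =>
    have hc : pvIsDelim c = false := h2 c (by simp)
    have hc' : ¬ (c = '+' ∨ c = ' ') := by simpa [pvIsDelim] using hc
    push_neg at hc'
    cases r with
    | nil =>
      cases rest' with
      | nil => simp at h3
      | cons e rest'' =>
        have he : e = d := by simpa using h3
        have hd' : e = '+' ∨ e = ' ' := by rw [he]; simpa [pvIsDelim] using h4
        rcases hd' with h | h <;>
          simp [aLoop, hc'.1, hc'.2, h]
    | cons c2 r' =>
      have hc2 : pvIsDelim c2 = false := h2 c2 (by simp)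
      have hc2' : ¬ (c2 = '+' ∨ c2 = ' ') := by simpa [pvIsDelim] using hc2
      push_neg at hc2'
      have step : aLoop tags2 i (c :: c2 :: r' ++ rest') outa cur =
          aLoop tags2 (i+1) (c2 :: r' ++ rest') (outa ++ [[c]]) cur := by
        simp [aLoop, hc'.1, hc'.2, hc2'.1, hc2'.2]
      rw [step, ih _ _ (by simp) (fun x hx => h2 x (List.mem_cons_of_mem _ hx))]
      have : i + 1 + (c2 :: r').length = i + (c :: c2 :: r').length := by simp; omega
      rw [this]
      simp

-- the main loop correspondence: A's char-wise loop and B's run-wise loop produce `none`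
-- together, or the same cur_tag and flatten-equal result lists, A's ending in a 1-char entry
theorem loop_rel (tags2 : List (List Char)) :
    ∀ (fuel : Nat) (m : List Char) (i : Nat) (outa outb : List (List Char)) (cur : List Char),
    m.length ≤ fuel → outa.flatten = outb.flatten →
    (aLoop tags2 i m outa cur = none ∧ bLoop tags2 fuel i m outb cur = none) ∨
    (∃ ra c rb, aLoop tags2 i m outa cur = some (ra, c) ∧
      bLoop tags2 fuel i m outb cur = some (rb, c) ∧ ra.flatten = rb.flatten ∧
      ((m = [] ∧ ra = outa) ∨ ∃ d, ra.getLast? = some [d])) := by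
  intro fuel
  induction fuel with
  | zero =>
    intro m i outa outb cur hlen hf
    have hm : m = [] := List.eq_nil_of_length_eq_zero (Nat.le_zero.mp hlen)
    subst hm
    exact Or.inr ⟨outa, cur, outb, by simp [aLoop], by simp [bLoop], hf, Or.inl ⟨rfl, rfl⟩⟩
  | succ fuel ih =>
    intro m i outa outb cur hlen hf
    cases m with
    | nil =>
      exact Or.inr ⟨outa, cur, outb, by simp [aLoop], by simp [bLoop], hf, Or.inl ⟨rfl, rfl⟩⟩
    | cons c rest =>
      by_cases hd : pvIsDelim c = true
      · -- delimiter run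
        have hrunne : (c :: rest).takeWhile pvIsDelim ≠ [] := by
          simp [hd]
        have hdecomp := pv_takeWhile_append_drop pvIsDelim (c :: rest)
        have hall : ∀ x ∈ (c :: rest).takeWhile pvIsDelim, pvIsDelim x = true :=
          fun x hx => List.mem_takeWhile_imp hx
        have hhead : ∀ d, ((c :: rest).drop ((c :: rest).takeWhile pvIsDelim).length).head? = some d →
            pvIsDelim d = false := by
          rw [pv_drop_takeWhile]
          intro d hdd
          have := List.head?_dropWhile_not pvIsDelim (c :: rest)
          rw [hdd] at this
          simpa using this
        have ha := aLoop_delim_run tags2 ((c :: rest).takeWhile pvIsDelim)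
          ((c :: rest).drop ((c :: rest).takeWhile pvIsDelim).length) i outa cur c hrunne hall hhead
        rw [hdecomp] at ha
        have hb : bLoop tags2 (fuel+1) i (c :: rest) outb cur =
            match PySem.List.pyGet? tags2 ((i : Int) + ((c :: rest).takeWhile pvIsDelim).length) with
            | none => none
            | some t => bLoop tags2 fuel (i + ((c :: rest).takeWhile pvIsDelim).length)
                ((c :: rest).drop ((c :: rest).takeWhile pvIsDelim).length)
                (outb ++ [[((c :: rest).takeWhile pvIsDelim).getLastD c]]) t := by
          simp only [bLoop, hd, if_pos]
        rw [ha, hb]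
        cases hget : PySem.List.pyGet? tags2 ((i : Int) + ((c :: rest).takeWhile pvIsDelim).length) with
        | none => exact Or.inl ⟨rfl, rfl⟩
        | some t =>
          have hlen' : ((c :: rest).drop ((c :: rest).takeWhile pvIsDelim).length).length ≤ fuel := by
            have h1 : 0 < ((c :: rest).takeWhile pvIsDelim).length :=
              List.length_pos_of_ne_nil hrunne
            have h2 : (c :: rest).length ≤ fuel + 1 := hlen
            simp only [List.length_drop]
            simp only [List.length_cons] at h2 ⊢
            omega
          have hf' : (outa ++ [[((c :: rest).takeWhile pvIsDelim).getLastD c]]).flatten =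
              (outb ++ [[((c :: rest).takeWhile pvIsDelim).getLastD c]]).flatten := by
            simp [hf]
          rcases ih _ (i + ((c :: rest).takeWhile pvIsDelim).length) _ _ t hlen' hf' with
            ⟨h1, h2⟩ | ⟨ra, cc, rb, h1, h2, h3, h4⟩
          · exact Or.inl ⟨h1, h2⟩
          · refine Or.inr ⟨ra, cc, rb, h1, h2, h3, Or.inr ?_⟩
            rcases h4 with ⟨_, hra⟩ | hx
            · exact ⟨((c :: rest).takeWhile pvIsDelim).getLastD c,
                by rw [hra]; simp⟩
            · exact hx
      · -- syllable run
        have hd' : pvIsDelim c = false := by simpa using hd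
        have hrunne : (c :: rest).takeWhile (fun x => ! pvIsDelim x) ≠ [] := by
          simp [hd']
        have hdecomp := pv_takeWhile_append_drop (fun x => ! pvIsDelim x) (c :: rest)
        have hall : ∀ x ∈ (c :: rest).takeWhile (fun x => ! pvIsDelim x), pvIsDelim x = false := by
          intro x hx
          have := List.mem_takeWhile_imp hx
          simpa using this
        by_cases hne : (c :: rest).drop ((c :: rest).takeWhile (fun x => ! pvIsDelim x)).length = []
        · -- syllable run reaches the end of morph
          have hrun : (c :: rest).takeWhile (fun x => ! pvIsDelim x) = c :: rest := by
            have h := hdecomp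
            rwa [hne, List.append_nil] at h
          have ha := aLoop_syl_run_end tags2 ((c :: rest).takeWhile (fun x => ! pvIsDelim x))
            i outa cur hall
          rw [hrun] at ha
          have hb : bLoop tags2 (fuel+1) i (c :: rest) outb cur =
              some (outb ++ [(c :: rest).takeWhile (fun x => ! pvIsDelim x)], cur) := by
            simp only [bLoop]
            rw [if_neg (by simp [hd'])]
            simp [hne]
          refine Or.inr ⟨_, cur, _, ha, hb, ?_, Or.inr ?_⟩
          · rw [hrun]
            simp [pv_flatten_map_singleton, hf]
          · cases hgl : (c :: rest).getLast? with
            | none => simp at hgl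
            | some y =>
              refine ⟨y, ?_⟩
              rw [List.getLast?_append_of_ne_nil _ (by simp)]
              rw [List.getLast?_map, hgl]
              rfl
        · -- syllable run followed by a delimiter
          obtain ⟨d, rest'', hrest'⟩ :
              ∃ d r, (c :: rest).drop ((c :: rest).takeWhile (fun x => ! pvIsDelim x)).length = d :: r := by
            cases h : (c :: rest).drop ((c :: rest).takeWhile (fun x => ! pvIsDelim x)).length with
            | nil => exact absurd h hne
            | cons y ys => exact ⟨y, ys, rfl⟩
          have hd4 : pvIsDelim d = true := by
            have h0 : ((c :: rest).dropWhile (fun x => ! pvIsDelim x)).head? = some d := by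
              rw [← pv_drop_takeWhile, hrest']
              rfl
            have := List.head?_dropWhile_not (fun x => ! pvIsDelim x) (c :: rest)
            rw [h0] at this
            simpa using this
          have ha := aLoop_syl_run_mid tags2 ((c :: rest).takeWhile (fun x => ! pvIsDelim x))
            ((c :: rest).drop ((c :: rest).takeWhile (fun x => ! pvIsDelim x)).length) d i outa cur
            hrunne hall (by rw [hrest']; rfl) hd4
          rw [hdecomp] at ha
          have hb : bLoop tags2 (fuel+1) i (c :: rest) outb cur =
              bLoop tags2 fuel (i + ((c :: rest).takeWhile (fun x => ! pvIsDelim x)).length)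
                ((c :: rest).drop ((c :: rest).takeWhile (fun x => ! pvIsDelim x)).length)
                (outb ++ [(c :: rest).takeWhile (fun x => ! pvIsDelim x), cur]) [] := by
            simp only [bLoop]
            rw [if_neg (by simp [hd'])]
            rw [if_neg hne]
          rw [ha, hb]
          have hlen' : ((c :: rest).drop ((c :: rest).takeWhile (fun x => ! pvIsDelim x)).length).length ≤ fuel := by
            have h1 : 0 < ((c :: rest).takeWhile (fun x => ! pvIsDelim x)).length :=
              List.length_pos_of_ne_nil hrunne
            have h2 : (c :: rest).length ≤ fuel + 1 := hlen
            simp only [List.length_drop]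
            simp only [List.length_cons] at h2 ⊢
            omega
          have hf' : (outa ++ ((c :: rest).takeWhile (fun x => ! pvIsDelim x)).map (fun c => [c]) ++ [cur]).flatten =
              (outb ++ [(c :: rest).takeWhile (fun x => ! pvIsDelim x), cur]).flatten := by
            simp [pv_flatten_map_singleton, hf]
          rcases ih _ (i + ((c :: rest).takeWhile (fun x => ! pvIsDelim x)).length) _ _ [] hlen' hf' with
            ⟨h1, h2⟩ | ⟨ra, cc, rb, h1, h2, h3, h4⟩
          · exact Or.inl ⟨h1, h2⟩
          · refine Or.inr ⟨ra, cc, rb, h1, h2, h3, Or.inr ?_⟩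
            rcases h4 with ⟨habs, _⟩ | hx
            · rw [hrest'] at habs
              simp at habs
            · exact hx

-- ===== VERDICT (by name: the statement is the Claim_ definition above) =====
theorem No_BI_first_spec : Claim_equal_No_BI_first := by
  unfold Claim_equal_No_BI_first
  intro morph tag _ hpre
  obtain ⟨hpre1, _⟩ := hpre
  unfold Spec_No_BI_first No_BI_first No_BI_first_alt
  simp only []
  rcases loop_rel (PySem.Chars.splitOn tag.toList [' '] ++ [pvEnd]) morph.toList.length
      morph.toList 0 [] [] ((PySem.Chars.splitOn tag.toList [' ']).headD []) le_rfl rfl with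
    ⟨ha, hb⟩ | ⟨ra, c, rb, ha, hb, hflat, hlast⟩
  · rw [ha, hb]
  · rw [ha, hb]
    by_cases hc : c = pvEnd
    · simp [hc, hflat]
    · rcases hlast with ⟨hm, hra⟩ | ⟨d, hdl⟩
      · rw [hm] at ha
        simp only [aLoop, Option.some.injEq, Prod.mk.injEq] at ha
        exact absurd (ha.2 ▸ hpre1 hm) hc
      · have hget : PySem.List.pyGet? ra (-1 : Int) = some [d] := by
          rw [PySem.List.pyGet?_neg_one, hdl]
        have h1 : ([d] : List Char) ≠ ['/', 'O'] := by
          intro h; exact absurd (congrArg List.length h) (by simp)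
        have h2 : ([d] : List Char) ≠ ['/', 'O', '+'] := by
          intro h; exact absurd (congrArg List.length h) (by simp)
        simp [hc, hget, h1, h2, hflat]
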